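-- pv_equiv track=rewrite | github.com/bledidalipaj/codefights | challenges/python/alpha4.py | alpha4
-- ===== SOURCE A (Python) =====
-- def alpha4(s):
--     res = []
--     for i in range(0, len(s), 4):
--         val = 0
--         for ch in s[i : i + 4]:
--             val += ord(ch) - ord('a')
--         res.append(str(val % 4))
--     return ''.join(res)
-- ===== SOURCE B (Python) =====
-- def alpha4(s):
--     parts = []
--     val = 0
--     n = len(s)
--     for i, ch in enumerate(s):
--         val += ord(ch) - 97
--         if i % 4 == 3 or i == n - 1:
--             parts.append(str(val % 4))
--             val = 0
--     return ''.join(parts)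
-- ===== Notes on version B (the rewrite author's own statement) =====
-- stated objective: alternative
-- what changed: Replaces the nested loop over 4-wide slices (range step 4, then an inner loop over s[i:i+4]) with one flat pass over enumerate(s) keeping a running chunk sum that is flushed when i%4==3 or at the last character.
import Mathlib
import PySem

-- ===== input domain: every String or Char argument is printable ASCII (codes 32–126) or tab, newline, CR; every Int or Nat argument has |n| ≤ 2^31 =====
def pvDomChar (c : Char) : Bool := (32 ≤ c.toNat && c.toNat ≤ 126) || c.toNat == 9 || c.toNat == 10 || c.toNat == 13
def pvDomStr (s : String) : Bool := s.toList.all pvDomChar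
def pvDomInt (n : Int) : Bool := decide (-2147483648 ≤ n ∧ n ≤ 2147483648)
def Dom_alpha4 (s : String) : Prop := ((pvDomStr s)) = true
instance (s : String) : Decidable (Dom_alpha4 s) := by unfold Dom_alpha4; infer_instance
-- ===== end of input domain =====

-- B replaces A's nested loop over 4-character slices by a single flat pass with a running
-- chunk sum flushed at i%4==3 or the last character: an alternative decomposition, same cost.

-- ===== PORT A =====
def alpha4 (s : String) : String :=
  let cs := s.toList
  let res := (PySem.List.pyRange 0 (PySem.Str.len s) 4).foldl
    (fun (res : List String) (i : Int) =>
      let val := (PySem.List.slice cs (some i) (some (i + 4))).foldl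
        (fun v ch => v + ((ch.toNat : Int) - ('a'.toNat : Int))) 0
      res ++ [PySem.Int.toStr (PySem.Int.mod val 4)]) []
  PySem.Str.join "" res

-- ===== PORT B =====
def alpha4_alt (s : String) : String :=
  let cs := s.toList
  let n : Int := PySem.Str.len s
  let st := (PySem.List.enumerate cs).foldl
    (fun (st : Int × List String) (p : Int × Char) =>
      let val := st.1 + ((p.2.toNat : Int) - 97)
      if PySem.Int.mod p.1 4 == 3 || p.1 == n - 1 then
        (0, st.2 ++ [PySem.Int.toStr (PySem.Int.mod val 4)])
      else (val, st.2))
    (0, [])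
  PySem.Str.join "" st.2

-- ===== PRECONDITION & SPEC =====
def Spec_alpha4 (s : String) (out : String) : Prop := out = alpha4_alt s
instance (s : String) (out : String) : Decidable (Spec_alpha4 s out) := by unfold Spec_alpha4; infer_instance

-- ===== CLAIM (what is proved, stated in full; the proofs are below) =====
def Claim_equal_alpha4 : Prop := ∀ (s : String), Dom_alpha4 s → Spec_alpha4 s (alpha4 s)

-- ===== LEMMAS AND PROOFS =====

-- character value ord(ch) - 97
def chVal (c : Char) : Int := (c.toNat : Int) - ('a'.toNat : Int)

-- reference: the chunk digits, one per 4-character block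
def chunks : List Char → List String
  | [] => []
  | c :: t =>
    PySem.Int.toStr (PySem.Int.mod (((c :: t.take 3).map chVal).sum) 4) :: chunks (t.drop 3)
termination_by l => l.length
decreasing_by simp

theorem chunks_cons (c : Char) (t : List Char) :
    chunks (c :: t) =
      PySem.Int.toStr (PySem.Int.mod ((((c :: t).take 4).map chVal).sum) 4) :: chunks ((c :: t).drop 4) := by
  rw [chunks]
  simp

theorem chVal_def : chVal = fun c : Char => (c.toNat : Int) - 97 :=
  funext fun c => by simp [chVal]

theorem slice_chunk (cs : List Char) (k : Nat) :
    PySem.List.slice cs (some (0 + 4 * (k : Int))) (some (0 + 4 * (k : Int) + 4)) =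
      (cs.drop (4 * k)).take 4 := by
  have h1 : (0 + 4 * (k : Int)) = ((4 * k : Nat) : Int) := by push_cast; ring
  have h2 : (0 + 4 * (k : Int) + 4) = ((4 * k : Nat) : Int) + ((4 : Nat) : Int) := by push_cast; ring
  rw [h2, h1]
  exact_mod_cast PySem.List.slice_natCast_add cs (4 * k) 4

theorem A_chunks : ∀ (m : Nat) (cs : List Char), cs.length ≤ m →
    (List.range ((cs.length + 3) / 4)).map
      (fun (k : Nat) => PySem.Int.toStr (PySem.Int.mod
        ((PySem.List.slice cs (some (0 + 4 * (k : Int))) (some (0 + 4 * (k : Int) + 4))).foldl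
          (fun v ch => v + ((ch.toNat : Int) - ('a'.toNat : Int))) 0) 4))
      = chunks cs := by
  intro m
  induction m with
  | zero =>
    intro cs h
    have : cs = [] := List.eq_nil_of_length_eq_zero (by omega)
    subst this
    simp [chunks]
  | succ m ih =>
    intro cs h
    match cs with
    | [] => simp [chunks]
    | c :: t =>
      have hlen4 : ((c :: t).drop 4).length ≤ m := by
        simp at h ⊢; omega
      have hm : ((c :: t).length + 3) / 4 = (((c :: t).drop 4).length + 3) / 4 + 1 := by
        simp; omega
      rw [hm, List.range_succ_eq_map, List.map_cons, List.map_map, chunks_cons]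
      congr 1
      · rw [slice_chunk (c :: t) 0]
        rw [PySem.List.foldl_add]
        simp [chVal_def]
      · refine (List.map_congr_left ?_).trans (ih ((c :: t).drop 4) hlen4)
        intro k hk
        simp only [Function.comp_apply, Nat.succ_eq_add_one]
        rw [slice_chunk (c :: t) (k + 1), slice_chunk ((c :: t).drop 4) k, List.drop_drop]
        have h4 : 4 * (k + 1) = 4 + 4 * k := by ring
        rw [h4]

theorem bstep_no_flush (n : Int) (p : Int × Char) (st : Int × List String)
    (h3 : (PySem.Int.mod p.1 4 == (3 : Int)) = false) (hn : ((p.1 == n - 1) : Bool) = false) :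
    (let val := st.1 + ((p.2.toNat : Int) - 97)
     if PySem.Int.mod p.1 4 == 3 || p.1 == n - 1 then
       (0, st.2 ++ [PySem.Int.toStr (PySem.Int.mod val 4)])
     else (val, st.2))
      = (st.1 + ((p.2.toNat : Int) - 97), st.2) := by
  simp at h3 hn
  simp [h3, hn]

theorem bstep_flush (n : Int) (p : Int × Char) (st : Int × List String)
    (h3 : (PySem.Int.mod p.1 4 == (3 : Int)) = true) :
    (let val := st.1 + ((p.2.toNat : Int) - 97)
     if PySem.Int.mod p.1 4 == 3 || p.1 == n - 1 then
       (0, st.2 ++ [PySem.Int.toStr (PySem.Int.mod val 4)])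
     else (val, st.2))
      = (0, st.2 ++ [PySem.Int.toStr (PySem.Int.mod (st.1 + ((p.2.toNat : Int) - 97)) 4)]) := by
  simp at h3
  simp [h3]

theorem bshift : ∀ (t : List Char) (n j : Int) (st : Int × List String),
    (PySem.List.enumerate t (j + 4)).foldl
      (fun (st : Int × List String) (p : Int × Char) =>
        let val := st.1 + ((p.2.toNat : Int) - 97)
        if PySem.Int.mod p.1 4 == 3 || p.1 == n - 1 then
          (0, st.2 ++ [PySem.Int.toStr (PySem.Int.mod val 4)])
        else (val, st.2)) st
    = (PySem.List.enumerate t j).foldl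
      (fun (st : Int × List String) (p : Int × Char) =>
        let val := st.1 + ((p.2.toNat : Int) - 97)
        if PySem.Int.mod p.1 4 == 3 || p.1 == (n - 4) - 1 then
          (0, st.2 ++ [PySem.Int.toStr (PySem.Int.mod val 4)])
        else (val, st.2)) st := by
  intro t
  induction t with
  | nil => intro n j st; simp [PySem.List.enumerate_nil]
  | cons x xs ih =>
    intro n j st
    rw [PySem.List.enumerate_cons, PySem.List.enumerate_cons, List.foldl_cons, List.foldl_cons]
    have hmod : PySem.Int.mod (j + 4) 4 = PySem.Int.mod j 4 := by
      rw [PySem.Int.mod_eq_emod_of_pos (by norm_num), PySem.Int.mod_eq_emod_of_pos (by norm_num)]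
      omega
    have hcond : ((j + 4 : Int) == n - 1) = ((j : Int) == (n - 4) - 1) := by
      rw [Bool.eq_iff_iff]
      simp only [beq_iff_eq]
      omega
    have harg : (j + 4 + 1 : Int) = (j + 1) + 4 := by ring
    simp only [hmod, hcond, harg]
    exact ih n (j + 1) _

theorem B_chunks : ∀ (m : Nat) (cs : List Char), cs.length ≤ m → ∀ (acc : List String),
    ((PySem.List.enumerate cs 0).foldl
      (fun (st : Int × List String) (p : Int × Char) =>
        let val := st.1 + ((p.2.toNat : Int) - 97)
        if PySem.Int.mod p.1 4 == 3 || p.1 == (cs.length : Int) - 1 then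
          (0, st.2 ++ [PySem.Int.toStr (PySem.Int.mod val 4)])
        else (val, st.2))
      (0, acc)).2 = acc ++ chunks cs := by
  intro m
  induction m with
  | zero =>
    intro cs h acc
    have : cs = [] := List.eq_nil_of_length_eq_zero (by omega)
    subst this
    simp [chunks]
  | succ m ih =>
    intro cs h acc
    match cs with
    | [] => simp [chunks]
    | [a] =>
      simp [PySem.List.enumerate_cons, PySem.List.enumerate_nil, chunks, chVal_def]
    | [a, b] =>
      simp [PySem.List.enumerate_cons, PySem.List.enumerate_nil, chunks, chVal_def]
    | [a, b, c] =>
      simp [PySem.List.enumerate_cons, PySem.List.enumerate_nil, chunks, chVal_def]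
      congr 1
      ring_nf
    | a :: b :: c :: d :: t =>
      have hlen : t.length ≤ m := by simp at h; omega
      have hne : ∀ i : Int, 0 ≤ i → i ≤ 2 →
          ((i == ((a :: b :: c :: d :: t).length : Int) - 1) : Bool) = false := by
        intro i hi1 hi2
        rw [beq_eq_false_iff_ne]
        simp only [List.length_cons]
        push_cast
        omega
      rw [PySem.List.enumerate_cons, PySem.List.enumerate_cons, PySem.List.enumerate_cons,
          PySem.List.enumerate_cons, List.foldl_cons, List.foldl_cons, List.foldl_cons,
          List.foldl_cons,
          bstep_no_flush _ (0, a) _ (by simp) (hne 0 (by norm_num) (by norm_num)),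
          bstep_no_flush _ (0 + 1, b) _ (by simp) (hne (0 + 1) (by norm_num) (by norm_num)),
          bstep_no_flush _ (0 + 1 + 1, c) _ (by simp) (hne (0 + 1 + 1) (by norm_num) (by norm_num)),
          bstep_flush _ (0 + 1 + 1 + 1, d) _ (by simp)]
      rw [show ((0 : Int) + 1 + 1 + 1 + 1) = 0 + 4 from by norm_num]
      rw [bshift t _ 0]
      rw [show ((((a :: b :: c :: d :: t).length : Nat) : Int) - 4 - 1)
            = ((t.length : Nat) : Int) - 1 from by simp; omega]
      rw [ih t hlen]
      rw [chunks_cons]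
      simp only [List.take_succ_cons, List.take_zero, List.drop_succ_cons, List.drop_zero,
        List.map_cons, List.sum_cons, chVal_def, List.append_assoc, List.cons_append, List.nil_append]
      congr 3
      simp
      ring_nf

theorem alpha4_spec : Claim_equal_alpha4 := by
  intro s _
  show alpha4 s = alpha4_alt s
  unfold alpha4 alpha4_alt
  simp only [PySem.Str.len_eq]
  rw [PySem.List.foldl_append_singleton_eq_map, List.nil_append]
  rw [PySem.List.pyRange_of_pos 0 (s.toList.length : Int) (by norm_num)]
  rw [show (if (0 : Int) < (s.toList.length : Int)
        then (((s.toList.length : Int) - 0 + 4 - 1) / 4).toNat else 0)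
      = (s.toList.length + 3) / 4 from by split_ifs <;> omega]
  rw [List.map_map]
  simp only [Function.comp_def]
  rw [A_chunks s.toList.length s.toList (le_refl _)]
  have hB := B_chunks s.toList.length s.toList (le_refl _) []
  rw [List.nil_append] at hB
  exact (congrArg (PySem.Str.join "") hB).symm
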